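-- pv_equiv track=rewrite | github.com/sky1241/yggdrasil-engine | engine/meteorites.py | _generate_periods
-- ===== SOURCE A (Python) =====
-- def _parse_period(p: str) -> tuple[int, int]:
--     """Parse "YYYY" → (year, 6) ou "YYYY-MM" → (year, month)."""
--     parts = p.split("-")
--     year = int(parts[0])
--     month = int(parts[1]) if len(parts) > 1 else 6  # milieu d'année par défaut
--     return year, month
--
-- def _generate_periods(start: str, n_months: int) -> list[str]:
--     """Génère n_months périodes mensuelles à partir de start."""
--     y, m = _parse_period(start)
--     periods = []
--     for _ in range(n_months):
--         m += 1
--         if m > 12: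
--             m = 1
--             y += 1
--         periods.append(f"{y:04d}-{m:02d}")
--     return periods
-- ===== SOURCE B (Python) =====
-- def _generate_periods(start: str, n_months: int) -> list[str]:
--     """Same periods, computed positionally: each entry is derived from an
--     absolute month index via divmod instead of stepping a (year, month) pair."""
--     parts = start.split("-")
--     y = int(parts[0])
--     m = int(parts[1]) if len(parts) > 1 else 6
--     base = y * 12 + m
--     return [f"{(base + i) // 12:04d}-{(base + i) % 12 + 1:02d}" for i in range(n_months)]
-- ===== Notes on version B (the rewrite author's own statement) =====
-- stated objective: alternative
-- what changed: Replaces the running (year, month) accumulator with a positional computation: each period is derived independently from an absolute month index base+i via floor divmod by 12, removing the mutable state and the overflow branch.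
-- intended difference: On starts whose explicit month field exceeds 12 (with n_months >= 1), A's single per-step overflow check collapses any such month to December of the same year, so A('2020-25',1) returns ['2021-01'] just like '2020-12' would, while B carries the excess months into years arithmetically and returns ['2022-02'], the intended calendar normalization. — e.g. on _generate_periods("2020-25", 1): A returns ["2021-01"], B returns ["2022-02"]
import Mathlib
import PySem

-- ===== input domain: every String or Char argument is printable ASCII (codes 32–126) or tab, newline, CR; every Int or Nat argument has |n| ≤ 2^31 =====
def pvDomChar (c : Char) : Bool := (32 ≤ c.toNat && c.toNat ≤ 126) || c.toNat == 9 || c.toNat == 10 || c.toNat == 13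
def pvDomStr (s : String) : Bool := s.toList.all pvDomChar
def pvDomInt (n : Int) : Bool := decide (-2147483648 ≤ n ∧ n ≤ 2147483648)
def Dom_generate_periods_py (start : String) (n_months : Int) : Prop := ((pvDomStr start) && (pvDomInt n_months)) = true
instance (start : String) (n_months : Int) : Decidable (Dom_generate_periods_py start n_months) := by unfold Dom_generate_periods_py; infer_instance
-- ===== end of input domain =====

-- B replaces A's running (year, month) accumulator and overflow branch by computing each
-- period independently from an absolute month index via floor divmod by 12 (objective: alternative).

-- ===== PORT A =====
-- f"{y:04d}-{m:02d}" : zero-padded decimal; PySem.Str.zfill on str(n) is exact for this format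
def pvFmtA (y m : Int) : String :=
  PySem.Str.zfill (PySem.Int.toStr y) 4 ++ "-" ++ PySem.Str.zfill (PySem.Int.toStr m) 2

-- _parse_period; none = the ValueError of int(); split? is some since "-" ≠ ""
def pvParsePeriod (p : String) : Option (Int × Int) :=
  let parts := (PySem.Str.split? p "-").getD []
  match PySem.Int.ofStr? (parts.getD 0 "") with
  | none => none
  | some year =>
    if parts.length > 1 then
      match PySem.Int.ofStr? (parts.getD 1 "") with
      | none => none
      | some month => some (year, month)
    else
      some (year, 6)

def generate_periods_py (start : String) (n_months : Int) : List String :=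
  match pvParsePeriod start with
  | none => []  -- Python raises ValueError here; Pre_ excludes these inputs
  | some (y0, m0) =>
    ((PySem.List.pyRange 0 n_months 1).foldl
      (fun (st : Int × Int × List String) _ =>
        let m1 := st.2.1 + 1
        let ym := if m1 > 12 then (st.1 + 1, (1 : Int)) else (st.1, m1)
        (ym.1, ym.2, st.2.2 ++ [pvFmtA ym.1 ym.2]))
      (y0, m0, ([] : List String))).2.2

-- ===== PORT B =====
def generate_periods_py_alt (start : String) (n_months : Int) : List String :=
  let parts := (PySem.Str.split? start "-").getD []
  match PySem.Int.ofStr? (parts.getD 0 "") with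
  | none => []  -- Python raises ValueError here; Pre_ excludes these inputs
  | some y =>
    match (if parts.length > 1 then PySem.Int.ofStr? (parts.getD 1 "") else some 6) with
    | none => []  -- ValueError; excluded by Pre_
    | some m =>
      let base := y * 12 + m
      (PySem.List.pyRange 0 n_months 1).map (fun i =>
        PySem.Str.zfill (PySem.Int.toStr (PySem.Int.floordiv (base + i) 12)) 4 ++ "-" ++
        PySem.Str.zfill (PySem.Int.toStr (PySem.Int.mod (base + i) 12 + 1)) 2)

-- ===== PRECONDITION & SPEC =====
-- Pre_ : exactly the inputs where Python A returns (both int() calls succeed, i.e. no ValueError)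
def Pre_generate_periods_py (start : String) (n_months : Int) : Prop :=
  let parts := (PySem.Str.split? start "-").getD []
  (PySem.Int.ofStr? (parts.getD 0 "")).isSome = true ∧
  (parts.length ≤ 1 ∨ (PySem.Int.ofStr? (parts.getD 1 "")).isSome = true)
instance (start : String) (n_months : Int) : Decidable (Pre_generate_periods_py start n_months) := by
  unfold Pre_generate_periods_py; infer_instance

def pvWitness_generate_periods_py : String × Int := ("2020-05", 3)

-- On starts whose explicit month field exceeds 12 (with n_months ≥ 1), A's single per-step overflow
-- check collapses any such month to December of the same year (A "2020-25" 1 = ["2021-01"], same as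
-- for "2020-12"), while B carries the excess months into years arithmetically (["2022-02"]),
-- the intended calendar normalization. (A negative month field cannot arise: split removes every '-'.)
def D_generate_periods_py (start : String) (n_months : Int) : Prop :=
  (decide (1 ≤ n_months) &&
    (match PySem.Str.split? start "-" with
     | some (_ :: mtok :: _) =>
       (match PySem.Int.ofStr? mtok with
        | some mval => decide (12 < mval) || decide (mval < 0)
        | none => false)
     | _ => false)) = true
instance (start : String) (n_months : Int) : Decidable (D_generate_periods_py start n_months) := by
  unfold D_generate_periods_py; infer_instance

def Spec_generate_periods_py (start : String) (n_months : Int) (out : List String) : Prop :=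
  ¬ D_generate_periods_py start n_months → out = generate_periods_py_alt start n_months
instance (start : String) (n_months : Int) (out : List String) : Decidable (Spec_generate_periods_py start n_months out) := by
  unfold Spec_generate_periods_py; infer_instance

def pvDiffWitness_generate_periods_py : String × Int := ("2020-25", 1)
def pvDiffWitnessOut_generate_periods_py : (List String) × (List String) := (["2021-01"], ["2022-02"])

-- ===== CLAIM (what is proved, stated in full; the proofs are below) =====
def Claim_unchanged_generate_periods_py : Prop := ∀ (start : String) (n_months : Int), Dom_generate_periods_py start n_months → Pre_generate_periods_py start n_months → Spec_generate_periods_py start n_months (generate_periods_py start n_months)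
def Claim_changed_generate_periods_py : Prop := Dom_generate_periods_py (pvDiffWitness_generate_periods_py.1) (pvDiffWitness_generate_periods_py.2) ∧ Pre_generate_periods_py (pvDiffWitness_generate_periods_py.1) (pvDiffWitness_generate_periods_py.2) ∧ D_generate_periods_py (pvDiffWitness_generate_periods_py.1) (pvDiffWitness_generate_periods_py.2) ∧ generate_periods_py (pvDiffWitness_generate_periods_py.1) (pvDiffWitness_generate_periods_py.2) = pvDiffWitnessOut_generate_periods_py.1 ∧ generate_periods_py_alt (pvDiffWitness_generate_periods_py.1) (pvDiffWitness_generate_periods_py.2) = pvDiffWitnessOut_generate_periods_py.2 ∧ pvDiffWitnessOut_generate_periods_py.1 ≠ pvDiffWitnessOut_generate_periods_py.2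
def Claim_exact_generate_periods_py : Prop := ∀ (start : String) (n_months : Int), Dom_generate_periods_py start n_months → Pre_generate_periods_py start n_months → D_generate_periods_py start n_months → generate_periods_py start n_months ≠ generate_periods_py_alt start n_months

-- ===== LEMMAS AND PROOFS =====

-- From ¬D_ (and n ≥ 1, an explicit month field) the parsed month lies in 0 … 12.
theorem pv_D_bounds (start : String) (n : Int) (hn : 1 ≤ n)
    (hl : ((PySem.Str.split? start "-").getD []).length > 1)
    (m0 : Int)
    (hm0 : PySem.Int.ofStr? (((PySem.Str.split? start "-").getD []).getD 1 "") = some m0)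
    (hD : ¬ D_generate_periods_py start n) : 0 ≤ m0 ∧ m0 ≤ 12 := by
  cases hsp : PySem.Str.split? start "-" with
  | none => rw [hsp] at hl; simp at hl
  | some ps =>
    rw [hsp] at hl hm0
    rcases ps with _ | ⟨a, _ | ⟨b, t⟩⟩
    · simp at hl
    · simp at hl
    · simp only [Option.getD_some] at hl hm0
      simp only [List.getD_cons_succ, List.getD_cons_zero] at hm0
      simp only [D_generate_periods_py, hsp, hm0, Bool.and_eq_true, Bool.or_eq_true,
        decide_eq_true_eq, not_and, not_or] at hD
      have := hD hn
      omega

-- Loop invariant: A's fold (which ignores the loop variable and the emitter f) turns state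
-- (y, m) with 0 ≤ m ≤ 12 into exactly B's positional divmod values for indices 0 … |l| - 1.
theorem pv_loop_eq (f : Int → Int → String) (l : List Int) :
    ∀ (y m : Int) (acc : List String), 0 ≤ m → m ≤ 12 →
    (l.foldl
      (fun (st : Int × Int × List String) _ =>
        let m1 := st.2.1 + 1
        let ym := if m1 > 12 then (st.1 + 1, (1 : Int)) else (st.1, m1)
        (ym.1, ym.2, st.2.2 ++ [f ym.1 ym.2]))
      (y, m, acc)).2.2
    = acc ++ (List.range l.length).map (fun (k : Nat) =>
        f (PySem.Int.floordiv (y * 12 + m + (k : Int)) 12)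
          (PySem.Int.mod (y * 12 + m + (k : Int)) 12 + 1)) := by
  induction l with
  | nil => intro y m acc _ _; simp
  | cons a l ih =>
    intro y m acc h0 h12
    simp only [List.foldl_cons]
    by_cases h : m + 1 > 12
    · have hm : m = 12 := by omega
      subst hm
      simp only [if_pos h]
      rw [ih (y + 1) 1 _ (by norm_num) (by norm_num)]
      rw [List.length_cons, List.range_succ_eq_map, List.map_cons, List.map_map,
        List.append_assoc, List.singleton_append]
      have e1 : PySem.Int.floordiv (y * 12 + 12) 12 = y + 1 := by
        rw [PySem.Int.floordiv_eq_ediv_of_pos (by norm_num)]; omega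
      have e2 : PySem.Int.mod (y * 12 + 12) 12 = 0 := by
        rw [PySem.Int.mod_eq_emod_of_pos (by norm_num)]; omega
      congr 1
      congr 1
      · simp only [Nat.cast_zero, add_zero]
        rw [e1, e2]; norm_num
      · apply List.map_congr_left
        intro k _
        simp only [Function.comp_apply, Nat.succ_eq_add_one]
        rw [show (y + 1) * 12 + 1 + (k : Int) = y * 12 + 12 + ((k : Int) + 1) by ring]
        push_cast
        ring_nf
    · have hm : m < 12 := by omega
      simp only [if_neg h]
      rw [ih y (m + 1) _ (by omega) (by omega)]
      rw [List.length_cons, List.range_succ_eq_map, List.map_cons, List.map_map,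
        List.append_assoc, List.singleton_append]
      have e1 : PySem.Int.floordiv (y * 12 + m) 12 = y := by
        rw [PySem.Int.floordiv_eq_ediv_of_pos (by norm_num)]; omega
      have e2 : PySem.Int.mod (y * 12 + m) 12 = m := by
        rw [PySem.Int.mod_eq_emod_of_pos (by norm_num)]; omega
      congr 1
      congr 1
      · simp only [Nat.cast_zero, add_zero]
        rw [e1, e2]
      · apply List.map_congr_left
        intro k _
        simp only [Function.comp_apply, Nat.succ_eq_add_one]
        rw [show y * 12 + (m + 1) + (k : Int) = y * 12 + m + ((k : Int) + 1) by ring]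
        push_cast
        ring_nf

theorem pv_digitChar_inj {a b : Nat} (ha : a < 10) (hb : b < 10)
    (h : a.digitChar = b.digitChar) : a = b := by
  interval_cases a <;> interval_cases b <;> first | rfl | exact absurd h (by decide)

theorem pv_toDigits_inj : ∀ n m : Nat, Nat.toDigits 10 n = Nat.toDigits 10 m → n = m := by
  intro n
  induction n using Nat.strong_induction_on with
  | _ n ih =>
    intro m h
    by_cases hn : n < 10
    · by_cases hm : m < 10
      · rw [Nat.toDigits_of_lt_base hn, Nat.toDigits_of_lt_base hm] at h
        exact pv_digitChar_inj hn hm (List.singleton_inj.mp h)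
      · rw [Nat.toDigits_of_lt_base hn, Nat.toDigits_of_base_le (by norm_num) (by omega)] at h
        have hlen := congrArg List.length h
        simp only [List.length_singleton, List.length_append] at hlen
        have := @Nat.length_toDigits_pos 10 (m / 10)
        omega
    · by_cases hm : m < 10
      · rw [Nat.toDigits_of_base_le (by norm_num) (by omega), Nat.toDigits_of_lt_base hm] at h
        have hlen := congrArg List.length h
        simp only [List.length_singleton, List.length_append] at hlen
        have := @Nat.length_toDigits_pos 10 (n / 10)
        omega
      · rw [Nat.toDigits_of_base_le (by norm_num) (by omega : (10:Nat) ≤ n),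
            Nat.toDigits_of_base_le (by norm_num) (by omega : (10:Nat) ≤ m)] at h
        rw [← List.concat_eq_append, ← List.concat_eq_append] at h
        obtain ⟨h1, h2⟩ := (List.concat_inj).mp h
        have hq : n / 10 = m / 10 := ih (n / 10) (by omega) _ h1
        have hr : n % 10 = m % 10 :=
          pv_digitChar_inj (by omega) (by omega) h2
        omega

theorem pv_toDigits_head_ne_zero : ∀ n : Nat, 0 < n → ∀ t, Nat.toDigits 10 n ≠ '0' :: t := by
  intro n
  induction n using Nat.strong_induction_on with
  | _ n ih =>
    intro hn t h
    by_cases h10 : n < 10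
    · rw [Nat.toDigits_of_lt_base h10] at h
      have : n.digitChar = '0' := by simpa using congrArg (List.headD · ' ') h
      have : n = 0 := pv_digitChar_inj h10 (by norm_num) (by simpa using this)
      omega
    · rw [Nat.toDigits_of_base_le (by norm_num) (by omega)] at h
      rcases hd : Nat.toDigits 10 (n / 10) with _ | ⟨c, cs⟩
      · have := @Nat.length_toDigits_pos 10 (n / 10); simp [hd] at this
      · rw [hd, List.cons_append] at h
        obtain ⟨hc, -⟩ := List.cons.inj h
        exact ih (n / 10) (by omega) (by omega) cs (by rw [hd, hc])

theorem pv_toDigits_digit {n : Nat} {c : Char} (h : c ∈ Nat.toDigits 10 n) : c.isDigit = true :=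
  Nat.isDigit_of_mem_toDigits (by norm_num) (by norm_num) h

theorem pv_toDigits_ne_nil (n : Nat) : Nat.toDigits 10 n ≠ [] := by
  have := @Nat.length_toDigits_pos 10 n
  intro h; rw [h] at this; simp at this

theorem pv_zfill_digits (ds : List Char) (hne : ds ≠ [])
    (hd : ∀ c ∈ ds, c.isDigit = true) (k : Int) :
    PySem.Chars.zfill ds k =
      if k ≤ ds.length then ds else List.replicate (k.toNat - ds.length) '0' ++ ds := by
  unfold PySem.Chars.zfill
  rcases ds with _ | ⟨c, rest⟩
  · simp at hne
  · have hc : c.isDigit = true := hd c (by simp)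
    have hns : ¬ (c = '+' ∨ c = '-') := by
      rintro (rfl | rfl) <;> simp at hc
    split_ifs with h
    · rfl
    · simp only [if_neg hns]

theorem pv_zfill_sign (ds : List Char) (k : Int) :
    PySem.Chars.zfill ('-' :: ds) k =
      '-' :: (if k - 1 ≤ ds.length then ds
              else List.replicate ((k - 1).toNat - ds.length) '0' ++ ds) := by
  unfold PySem.Chars.zfill
  by_cases h1 : k ≤ (('-' :: ds).length : Int)
  · rw [if_pos h1, if_pos (by simp at h1 ⊢; omega)]
  · rw [if_neg h1]
    show '-' :: (List.replicate (k.toNat - ('-' :: ds).length) '0' ++ ds) = _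
    rw [if_neg (by simp at h1 ⊢; omega)]
    have hn : k.toNat - ('-' :: ds).length = (k - 1).toNat - ds.length := by
      simp only [not_le, List.length_cons] at h1 ⊢
      push_cast at h1
      omega
    rw [hn]

theorem pv_pad_head_zero (j : Nat) (hj : 0 < j) (es : List Char) :
    List.replicate j '0' ++ es = '0' :: (List.replicate (j - 1) '0' ++ es) := by
  rcases j with _ | j
  · omega
  · simp [List.replicate_succ]

-- a canonical digit string never equals '0' followed by a nonempty-digits tail
theorem pv_canon_ne_zero_cons (a : Nat) (es : List Char) (hes : es ≠ [])
    (h : Nat.toDigits 10 a = '0' :: es) : False := by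
  rcases Nat.eq_zero_or_pos a with rfl | ha
  · rw [Nat.toDigits_zero] at h
    exact hes (List.cons.inj h).2.symm
  · exact pv_toDigits_head_ne_zero a ha es h

theorem pv_pad_inj (k : Int) (a b : Nat)
    (h : PySem.Chars.zfill (Nat.toDigits 10 a) k = PySem.Chars.zfill (Nat.toDigits 10 b) k) :
    a = b := by
  rw [pv_zfill_digits _ (pv_toDigits_ne_nil a) (fun c hc => pv_toDigits_digit hc) k,
      pv_zfill_digits _ (pv_toDigits_ne_nil b) (fun c hc => pv_toDigits_digit hc) k] at h
  have hla := @Nat.length_toDigits_pos 10 a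
  have hlb := @Nat.length_toDigits_pos 10 b
  have hbn := pv_toDigits_ne_nil b
  have han := pv_toDigits_ne_nil a
  split_ifs at h with h1 h2 h2
  · exact pv_toDigits_inj _ _ h
  · rw [pv_pad_head_zero _ (by omega)] at h
    exact (pv_canon_ne_zero_cons a _ (by simp [List.append_eq_nil_iff, hbn]) h).elim
  · rw [pv_pad_head_zero _ (by omega)] at h
    exact (pv_canon_ne_zero_cons b _ (by simp [List.append_eq_nil_iff, han]) h.symm).elim
  · rcases lt_trichotomy (k.toNat - (Nat.toDigits 10 a).length)
        (k.toNat - (Nat.toDigits 10 b).length) with hij | hij | hij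
    · have hd := congrArg (List.drop (k.toNat - (Nat.toDigits 10 a).length)) h
      rw [List.drop_left' (by simp), List.drop_append_of_le_length (by simp; omega),
        List.drop_replicate] at hd
      rw [pv_pad_head_zero _ (by omega)] at hd
      exact (pv_canon_ne_zero_cons a _ (by simp [List.append_eq_nil_iff, hbn]) hd).elim
    · rw [hij] at h
      exact pv_toDigits_inj _ _ (List.append_cancel_left h)
    · have hd := congrArg (List.drop (k.toNat - (Nat.toDigits 10 b).length)) h
      rw [List.drop_append_of_le_length (by simp; omega), List.drop_replicate,
        List.drop_left' (by simp)] at hd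
      rw [pv_pad_head_zero _ (by omega)] at hd
      exact (pv_canon_ne_zero_cons b _ (by simp [List.append_eq_nil_iff, han]) hd.symm).elim

theorem pv_toChars_nonneg {x : Int} (hx : 0 ≤ x) :
    PySem.Int.toChars x = Nat.toDigits 10 x.toNat := by
  unfold PySem.Int.toChars
  rw [if_neg (by omega)]

theorem pv_toChars_neg {x : Int} (hx : x < 0) :
    PySem.Int.toChars x = '-' :: Nat.toDigits 10 x.natAbs := by
  unfold PySem.Int.toChars
  rw [if_pos hx]

-- every char of the zero-padded decimal of a nonnegative int is a digit
theorem pv_zfill_nonneg_digits {x : Int} (hx : 0 ≤ x) (k : Int) :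
    ∀ c ∈ PySem.Chars.zfill (PySem.Int.toChars x) k, c.isDigit = true := by
  rw [pv_toChars_nonneg hx,
    pv_zfill_digits _ (pv_toDigits_ne_nil _) (fun c hc => pv_toDigits_digit hc) k]
  intro c hc
  split_ifs at hc
  · exact pv_toDigits_digit hc
  · rcases List.mem_append.mp hc with h | h
    · rw [List.eq_of_mem_replicate h]; decide
    · exact pv_toDigits_digit h

theorem pv_zfill_neg_shape {x : Int} (hx : x < 0) (k : Int) :
    ∃ rest, PySem.Chars.zfill (PySem.Int.toChars x) k = '-' :: rest ∧
      ∀ c ∈ rest, c.isDigit = true := by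
  rw [pv_toChars_neg hx, pv_zfill_sign]
  refine ⟨_, rfl, ?_⟩
  intro c hc
  split_ifs at hc
  · exact pv_toDigits_digit hc
  · rcases List.mem_append.mp hc with h | h
    · rw [List.eq_of_mem_replicate h]; decide
    · exact pv_toDigits_digit h

theorem pv_zfill_nonempty (x : Int) (k : Int) :
    PySem.Chars.zfill (PySem.Int.toChars x) k ≠ [] := by
  rcases lt_or_ge x 0 with hx | hx
  · obtain ⟨rest, hr, -⟩ := pv_zfill_neg_shape hx k
    rw [hr]; simp
  · rw [pv_toChars_nonneg hx,
      pv_zfill_digits _ (pv_toDigits_ne_nil _) (fun c hc => pv_toDigits_digit hc) k]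
    split_ifs
    · exact pv_toDigits_ne_nil _
    · simp [pv_toDigits_ne_nil]

-- the count of '-' in the padded decimal: 0 for x ≥ 0, 1 for x < 0
theorem pv_zfill_dash_count (x : Int) (k : Int) :
    (PySem.Chars.zfill (PySem.Int.toChars x) k).count '-' = if x < 0 then 1 else 0 := by
  rcases lt_or_ge x 0 with hx | hx
  · obtain ⟨rest, hr, hd⟩ := pv_zfill_neg_shape hx k
    rw [hr, if_pos hx, List.count_cons]
    have : rest.count '-' = 0 := by
      rw [List.count_eq_zero]
      intro hm
      have := hd _ hm
      simp at this
    simp [this]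
  · rw [if_neg (by omega), List.count_eq_zero]
    intro hm
    have := pv_zfill_nonneg_digits hx k _ hm
    simp at this

theorem pv_zfill_toChars_inj {a b : Int} (k : Int)
    (h : PySem.Chars.zfill (PySem.Int.toChars a) k = PySem.Chars.zfill (PySem.Int.toChars b) k) :
    a = b := by
  rcases lt_or_ge a 0 with ha | ha <;> rcases lt_or_ge b 0 with hb | hb
  · -- both negative
    rw [pv_toChars_neg ha, pv_toChars_neg hb, pv_zfill_sign, pv_zfill_sign] at h
    obtain ⟨-, h2⟩ := List.cons.inj h
    have : a.natAbs = b.natAbs := by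
      apply pv_pad_inj (k - 1)
      rw [pv_zfill_digits _ (pv_toDigits_ne_nil _) (fun c hc => pv_toDigits_digit hc),
          pv_zfill_digits _ (pv_toDigits_ne_nil _) (fun c hc => pv_toDigits_digit hc)]
      exact h2
    omega
  · -- a < 0 ≤ b: heads differ
    obtain ⟨rest, hr, -⟩ := pv_zfill_neg_shape ha k
    rw [hr] at h
    have hdig := pv_zfill_nonneg_digits hb k
    have : '-' ∈ PySem.Chars.zfill (PySem.Int.toChars b) k := by rw [← h]; simp
    have := hdig _ this
    simp at this
  · obtain ⟨rest, hr, -⟩ := pv_zfill_neg_shape hb k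
    rw [hr] at h
    have hdig := pv_zfill_nonneg_digits ha k
    have : '-' ∈ PySem.Chars.zfill (PySem.Int.toChars a) k := by rw [h]; simp
    have := hdig _ this
    simp at this
  · rw [pv_toChars_nonneg ha, pv_toChars_nonneg hb] at h
    have := pv_pad_inj k _ _ h
    omega

theorem pv_month_len {m : Int} (h0 : 0 ≤ m) (h12 : m ≤ 12) :
    (PySem.Chars.zfill (PySem.Int.toChars m) 2).length = 2 := by
  interval_cases m <;> decide

theorem pv_fmt_inj {y y' m m' : Int} (hm : m ≤ 12) (h1 : 1 ≤ m') (h2 : m' ≤ 12)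
    (h : pvFmtA y m = pvFmtA y' m') : y = y' ∧ m = m' := by
  have hl := congrArg String.toList h
  have hdash : ("-" : String).toList = ['-'] := rfl
  simp only [pvFmtA, String.toList_append, PySem.Str.toList_zfill, PySem.Int.toList_toStr,
    hdash, List.append_assoc, List.singleton_append] at hl
  -- Step 1: m must be nonnegative
  have hm0 : 0 ≤ m := by
    by_contra hneg
    rw [not_le] at hneg
    have hc := congrArg (List.count '-') hl
    simp only [List.count_append, List.count_cons, pv_zfill_dash_count] at hc
    rw [if_pos hneg, if_neg (by omega : ¬ m' < 0)] at hc
    have hy : ¬ y < 0 ∧ y' < 0 := by split_ifs at hc <;> simp_all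
    obtain ⟨rest, hr, -⟩ := pv_zfill_neg_shape hy.2 4
    rcases hz : PySem.Chars.zfill (PySem.Int.toChars y) 4 with _ | ⟨c, t⟩
    · exact pv_zfill_nonempty y 4 hz
    · have hcd : c.isDigit = true := by
        have := pv_zfill_nonneg_digits (by omega : (0:Int) ≤ y) 4 c (by rw [hz]; simp)
        exact this
      rw [hz, hr] at hl
      obtain ⟨hc', -⟩ := List.cons.inj hl
      rw [hc'] at hcd
      simp at hcd
  -- Step 2: split the two fields
  have hsplit := List.append_inj' hl (by
    simp only [List.length_cons, pv_month_len hm0 hm, pv_month_len (by omega : (0:Int) ≤ m') h2])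
  obtain ⟨hy, hmm⟩ := hsplit
  obtain ⟨-, hmm2⟩ := List.cons.inj hmm
  exact ⟨pv_zfill_toChars_inj 4 hy, pv_zfill_toChars_inj 2 hmm2⟩

theorem pv_fold_acc (l : List Int) : ∀ (y m : Int) (acc : List String),
    (l.foldl
      (fun (st : Int × Int × List String) _ =>
        let m1 := st.2.1 + 1
        let ym := if m1 > 12 then (st.1 + 1, (1 : Int)) else (st.1, m1)
        (ym.1, ym.2, st.2.2 ++ [pvFmtA ym.1 ym.2]))
      (y, m, acc)).2.2
    = acc ++ (l.foldl
      (fun (st : Int × Int × List String) _ =>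
        let m1 := st.2.1 + 1
        let ym := if m1 > 12 then (st.1 + 1, (1 : Int)) else (st.1, m1)
        (ym.1, ym.2, st.2.2 ++ [pvFmtA ym.1 ym.2]))
      (y, m, [])).2.2 := by
  induction l with
  | nil => intro y m acc; simp
  | cons a l ih =>
    intro y m acc
    simp only [List.foldl_cons]
    rw [ih]
    conv_rhs => rw [ih]
    simp

theorem pv_tight : ∀ (start : String) (n : Int),
    Pre_generate_periods_py start n → D_generate_periods_py start n →
    generate_periods_py start n ≠ generate_periods_py_alt start n := by
  intro start n hPre hD heq
  obtain ⟨h1, h2⟩ := hPre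
  obtain ⟨y0, hy0⟩ := Option.isSome_iff_exists.mp h1
  -- destructure D
  simp only [D_generate_periods_py, Bool.and_eq_true, decide_eq_true_eq] at hD
  obtain ⟨hn, hmonth⟩ := hD
  cases hsp : PySem.Str.split? start "-" with
  | none => rw [hsp] at hmonth; simp at hmonth
  | some ps =>
    rw [hsp] at hmonth
    rcases ps with _ | ⟨a, _ | ⟨b, t⟩⟩
    · simp at hmonth
    · simp at hmonth
    · have hl : ((PySem.Str.split? start "-").getD []).length > 1 := by rw [hsp]; simp
      cases hmb : PySem.Int.ofStr? b with
      | none => simp [hmb] at hmonth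
      | some m0 =>
        simp only [hmb, Bool.or_eq_true, decide_eq_true_eq] at hmonth
        have hm0 : PySem.Int.ofStr? (((PySem.Str.split? start "-").getD []).getD 1 "") = some m0 := by
          rw [hsp]; simpa using hmb
        -- unfold both sides at the witness equality
        simp only [generate_periods_py, generate_periods_py_alt, pvParsePeriod, hy0, hm0,
          if_pos hl] at heq
        rw [PySem.List.pyRange_one_cons (by omega : (0:Int) < n)] at heq
        simp only [List.foldl_cons, List.map_cons] at heq
        rw [pv_fold_acc] at heq
        rw [PySem.Int.floordiv_eq_ediv_of_pos (by norm_num),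
            PySem.Int.mod_eq_emod_of_pos (by norm_num),
            List.nil_append, List.singleton_append] at heq
        have hhead := (List.cons.inj heq).1
        by_cases hbig : m0 + 1 > 12
        · rw [if_pos hbig] at hhead
          obtain ⟨e1, e2⟩ := pv_fmt_inj (by norm_num) (by omega) (by omega) hhead
          omega
        · rw [if_neg hbig] at hhead
          obtain ⟨e1, e2⟩ := pv_fmt_inj (by omega) (by omega) (by omega) hhead
          omega

-- ===== VERDICT (by name: the statement is the Claim_ definition above) =====
theorem generate_periods_py_spec : Claim_unchanged_generate_periods_py := by
  intro start n hDom hPre hD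
  obtain ⟨h1, h2⟩ := hPre
  obtain ⟨y0, hy0⟩ := Option.isSome_iff_exists.mp h1
  by_cases hl : ((PySem.Str.split? start "-").getD []).length > 1
  · have h2' : (PySem.Int.ofStr? (((PySem.Str.split? start "-").getD []).getD 1 "")).isSome = true := by
      rcases h2 with h | h
      · omega
      · exact h
    obtain ⟨m0, hm0⟩ := Option.isSome_iff_exists.mp h2'
    simp only [generate_periods_py, generate_periods_py_alt, pvParsePeriod, hy0, hm0, if_pos hl]
    by_cases hn : (1 : Int) ≤ n
    · have hbounds := pv_D_bounds start n hn hl m0 hm0 hD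
      rw [pv_loop_eq pvFmtA _ y0 m0 [] (by omega) (by omega)]
      rw [PySem.List.pyRange_one, List.map_map]
      simp only [List.length_map, List.length_range, List.nil_append, pvFmtA]
      apply List.map_congr_left
      intro k _
      simp only [Function.comp_apply]
      norm_num
    · rw [PySem.List.pyRange_one_eq_nil (by omega)]
      simp
  · simp only [generate_periods_py, generate_periods_py_alt, pvParsePeriod, hy0, if_neg hl]
    rw [pv_loop_eq pvFmtA _ y0 6 [] (by norm_num) (by norm_num)]
    rw [PySem.List.pyRange_one, List.map_map]
    simp only [List.length_map, List.length_range, List.nil_append, pvFmtA]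
    apply List.map_congr_left
    intro k _
    simp only [Function.comp_apply]
    norm_num

theorem generate_periods_py_changed : Claim_changed_generate_periods_py := by
  unfold Claim_changed_generate_periods_py; decide

theorem generate_periods_py_tight : Claim_exact_generate_periods_py := by
  intro start n _ hPre hD
  exact pv_tight start n hPre hD
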